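-- pv_equiv track=rewrite | github.com/uoyoCsharp/me.uoyo | .ai-agents/scripts/update_framework.py | _split_yaml_sections
-- ===== SOURCE A (Python) =====
-- def _split_yaml_sections(text):
--     """
--     Split a YAML file into top-level sections.
--
--     Returns a list of (key, raw_text) tuples where *key* is the top-level
--     YAML key (e.g. "system") and *raw_text* is the full text of that section
--     including the key line and all indented lines below it.
--
--     Lines before the first top-level key (comments / blank lines) are returned
--     with key=None.
--     """
--     sections = []
--     current_key = None
--     current_lines = []
--
--     for line in text.splitlines(True):
--         # A top-level key: starts at column 0, is not a comment, contains ':'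
--         stripped = line.rstrip()
--         if stripped and not stripped.startswith("#") and not stripped[0].isspace() and ":" in stripped:
--             # Flush previous section
--             if current_lines:
--                 sections.append((current_key, "".join(current_lines)))
--             current_key = stripped.split(":")[0].strip()
--             current_lines = [line]
--         else:
--             current_lines.append(line)
--
--     if current_lines:
--         sections.append((current_key, "".join(current_lines)))
--
--     return sections
-- ===== SOURCE B (Python) =====
-- def _is_key_line(line):
--     stripped = line.rstrip()
--     return bool(stripped) and not stripped.startswith("#") and not stripped[0].isspace() and ":" in stripped
--
--
-- def _key_of(line):
--     return line.rstrip().split(":")[0].strip()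
--
--
-- def _split_yaml_sections(text):
--     lines = text.splitlines(True)
--     sections = []
--     i = 0
--     # leading lines before the first top-level key
--     while i < len(lines) and not _is_key_line(lines[i]):
--         i += 1
--     if i > 0:
--         sections.append((None, "".join(lines[:i])))
--     # each section: a key line plus the non-key lines after it
--     while i < len(lines):
--         j = i + 1
--         while j < len(lines) and not _is_key_line(lines[j]):
--             j += 1
--         sections.append((_key_of(lines[i]), "".join(lines[i:j])))
--         i = j
--     return sections
-- ===== Notes on version B (the rewrite author's own statement) =====
-- stated objective: alternative
-- what changed: B splits the line list into spans between top-level key lines (leading non-key span, then key line + following non-key run per section) instead of A's single fold carrying a flush-on-key accumulator.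
import Mathlib
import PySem

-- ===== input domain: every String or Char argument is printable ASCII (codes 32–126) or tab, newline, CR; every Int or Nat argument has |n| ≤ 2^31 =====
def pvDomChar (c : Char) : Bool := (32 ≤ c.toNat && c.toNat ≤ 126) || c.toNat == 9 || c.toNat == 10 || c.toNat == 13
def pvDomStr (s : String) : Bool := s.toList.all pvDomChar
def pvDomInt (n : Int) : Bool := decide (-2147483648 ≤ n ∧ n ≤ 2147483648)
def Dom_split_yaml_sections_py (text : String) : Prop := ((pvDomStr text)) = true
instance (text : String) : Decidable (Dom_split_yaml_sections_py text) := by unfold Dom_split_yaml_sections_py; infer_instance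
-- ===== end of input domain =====

-- B groups the line list by spans between key lines (leading span, then key+body spans)
-- instead of A's single fold with a flush-on-key accumulator; objective: alternative decomposition.

-- shared helper: text.splitlines(True) — keepends; exact on the domain's line breaks ('\n', '\r', '\r\n')
def pvSplitlinesKeep (acc : List Char) : List Char → List (List Char)
  | [] => if acc = [] then [] else [acc.reverse]
  | '\r' :: '\n' :: rest => (acc.reverse ++ ['\r', '\n']) :: pvSplitlinesKeep [] rest
  | '\r' :: rest => (acc.reverse ++ ['\r']) :: pvSplitlinesKeep [] rest
  | '\n' :: rest => (acc.reverse ++ ['\n']) :: pvSplitlinesKeep [] rest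
  | c :: rest => pvSplitlinesKeep (c :: acc) rest

-- ===== PORT A =====
-- the loop body of A: flush the current section on a top-level key line, else accumulate
def pvAStep (st : List (Option String × String) × Option String × List (List Char))
    (line : List Char) : List (Option String × String) × Option String × List (List Char) :=
  let (sections, key, cur) := st
  let s := PySem.Chars.rstrip line
  if decide (s ≠ []) && !PySem.Chars.startswith s ['#'] && !PySem.Chars.isspace (s.headD ' ')
      && PySem.Chars.isIn [':'] s then
    (sections ++ (if cur = [] then [] else [(key, String.ofList (PySem.Chars.join [] cur))]),
     some (String.ofList (PySem.Chars.strip ((PySem.Chars.splitOn s [':']).headD []))),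
     [line])
  else
    (sections, key, cur ++ [line])

def split_yaml_sections_py (text : String) : List (Option String × String) :=
  let st := (pvSplitlinesKeep [] text.toList).foldl pvAStep ([], none, [])
  st.1 ++ (if st.2.2 = [] then [] else [(st.2.1, String.ofList (PySem.Chars.join [] st.2.2))])

-- ===== PORT B =====
-- _is_key_line(line)
def pvIsKey (line : List Char) : Bool :=
  let s := PySem.Chars.rstrip line
  decide (s ≠ []) && !PySem.Chars.startswith s ['#'] && !PySem.Chars.isspace (s.headD ' ')
    && PySem.Chars.isIn [':'] s

-- _key_of(line)
def pvKeyOf (line : List Char) : String :=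
  String.ofList (PySem.Chars.strip ((PySem.Chars.splitOn (PySem.Chars.rstrip line) [':']).headD []))

-- one section per key line: the key line plus the run of non-key lines after it
def pvBGo : List (List Char) → List (Option String × String)
  | [] => []
  | l :: rest =>
      (some (pvKeyOf l),
        String.ofList (PySem.Chars.join [] (l :: rest.takeWhile (fun x => !pvIsKey x))))
        :: pvBGo (rest.dropWhile (fun x => !pvIsKey x))
termination_by ls => ls.length
decreasing_by
  have := List.length_dropWhile_le (fun x => !pvIsKey x) rest
  simp
  omega

def split_yaml_sections_py_alt (text : String) : List (Option String × String) :=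
  let lines := pvSplitlinesKeep [] text.toList
  let pre := lines.takeWhile (fun x => !pvIsKey x)
  (if pre = [] then [] else [(none, String.ofList (PySem.Chars.join [] pre))]) ++
    pvBGo (lines.dropWhile (fun x => !pvIsKey x))

-- ===== PRECONDITION & SPEC =====
def Spec_split_yaml_sections_py (text : String) (out : List (Option String × String)) : Prop := out = split_yaml_sections_py_alt text
instance (text : String) (out : List (Option String × String)) : Decidable (Spec_split_yaml_sections_py text out) := by unfold Spec_split_yaml_sections_py; infer_instance

-- ===== CLAIM (what is proved, stated in full; the proofs are below) =====
def Claim_equal_split_yaml_sections_py : Prop := ∀ (text : String), Dom_split_yaml_sections_py text → Spec_split_yaml_sections_py text (split_yaml_sections_py text)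

-- ===== LEMMAS AND PROOFS =====

def pvFinish (st : List (Option String × String) × Option String × List (List Char)) :
    List (Option String × String) :=
  st.1 ++ (if st.2.2 = [] then [] else [(st.2.1, String.ofList (PySem.Chars.join [] st.2.2))])

lemma pvAStep_eq (sections : List (Option String × String)) (key : Option String)
    (cur : List (List Char)) (line : List Char) :
    pvAStep (sections, key, cur) line =
      if pvIsKey line then
        (sections ++ (if cur = [] then [] else [(key, String.ofList (PySem.Chars.join [] cur))]),
         some (pvKeyOf line), [line])
      else (sections, key, cur ++ [line]) := by
  simp only [pvAStep, pvIsKey, pvKeyOf]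

lemma pvFold_spec (lines : List (List Char)) (sections : List (Option String × String))
    (key : Option String) (cur : List (List Char)) :
    pvFinish (lines.foldl pvAStep (sections, key, cur)) =
      sections ++
        (if cur ++ lines.takeWhile (fun x => !pvIsKey x) = [] then []
         else [(key, String.ofList (PySem.Chars.join []
                 (cur ++ lines.takeWhile (fun x => !pvIsKey x))))]) ++
        pvBGo (lines.dropWhile (fun x => !pvIsKey x)) := by
  induction lines generalizing sections key cur with
  | nil => simp [pvFinish, pvBGo]
  | cons l rest ih =>
    by_cases h : pvIsKey l
    · simp only [List.foldl_cons, pvAStep_eq, h, if_pos, List.takeWhile_cons,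
        List.dropWhile_cons, Bool.not_true]
      rw [ih]
      simp [pvBGo]
    · simp only [List.foldl_cons, pvAStep_eq, h, List.takeWhile_cons,
        List.dropWhile_cons]
      rw [ih]
      simp

-- ===== VERDICT (by name: the statement is the Claim_ definition above) =====
theorem split_yaml_sections_py_spec : Claim_equal_split_yaml_sections_py := by
  intro text _
  unfold Spec_split_yaml_sections_py split_yaml_sections_py split_yaml_sections_py_alt
  have h := pvFold_spec (pvSplitlinesKeep [] text.toList) [] none []
  simpa [pvFinish] using h
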